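-- pv_equiv track=rewrite | github.com/andreabruera/novel_aficionados | scripts/latest/novels_utilities.py | get_novel_sentences_from_versions_dict
-- ===== SOURCE A (Python) =====
-- def get_novel_sentences_from_versions_dict(version, character, background_vocab=None):
--     book_final=[]
--     vocab_final=[]
--     for line in version:
--         line_list=[]
--         vocab_list=[]
--         for w in line:
--             if w=='':
--                 pass
--             else:
--                 if w==character:
--                     line_list.append('___')
--                     vocab_list.append(character)
--                 else:
--                     line_list.append(w)
--                     vocab_list.append(w)
--         book_final.append(line_list)
--         vocab_final.append(vocab_list)
--     return book_final, vocab_final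
-- ===== SOURCE B (Python) =====
-- def _scatter(flat, n, g):
--     buckets = [[] for _ in range(n)]
--     for i, w in flat:
--         buckets[i].append(g(w))
--     return buckets
--
--
-- def get_novel_sentences_from_versions_dict(version, character, background_vocab=None):
--     # Flatten into one stream of (line-index, word) pairs with empty words
--     # dropped, then scatter that stream into index buckets twice: once
--     # verbatim (vocab_final) and once through the character mask (book_final).
--     flat = [(i, w) for i, line in enumerate(version) for w in line if w != '']
--     n = len(version)
--     vocab_final = _scatter(flat, n, lambda w: w)
--     book_final = _scatter(flat, n, lambda w: '___' if w == character else w)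
--     return book_final, vocab_final
-- ===== Notes on version B (the rewrite author's own statement) =====
-- stated objective: alternative
-- what changed: Instead of A's nested loop building both per-line lists in parallel, B flattens the input into a single filtered stream of (line-index, word) pairs and then scatters that stream into preallocated index buckets twice (verbatim for vocab_final, through the character mask for book_final).
import Mathlib
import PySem

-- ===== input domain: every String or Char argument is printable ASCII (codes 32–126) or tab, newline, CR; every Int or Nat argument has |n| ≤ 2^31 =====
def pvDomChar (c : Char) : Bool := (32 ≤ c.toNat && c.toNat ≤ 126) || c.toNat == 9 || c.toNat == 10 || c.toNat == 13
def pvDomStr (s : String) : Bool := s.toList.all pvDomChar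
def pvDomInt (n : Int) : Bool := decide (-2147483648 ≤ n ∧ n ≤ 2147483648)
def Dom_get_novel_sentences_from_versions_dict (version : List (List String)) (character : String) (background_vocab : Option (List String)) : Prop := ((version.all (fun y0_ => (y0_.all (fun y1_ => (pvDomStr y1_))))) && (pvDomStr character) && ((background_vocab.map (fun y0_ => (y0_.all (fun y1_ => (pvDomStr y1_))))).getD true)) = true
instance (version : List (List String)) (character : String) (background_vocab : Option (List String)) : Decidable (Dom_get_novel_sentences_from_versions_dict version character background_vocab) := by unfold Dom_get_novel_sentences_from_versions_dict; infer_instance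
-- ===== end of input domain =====

-- B replaces A's nested loop (both per-line lists built in parallel) with a flatten-and-scatter
-- algorithm: one filtered stream of (line-index, word) pairs, scattered into index buckets twice.
-- Same asymptotic cost; genuinely different data traversal.

-- ===== PORT A =====
-- A: one pass over version; for each line a loop appending to line_list (masked) and vocab_list (unmasked) in parallel.
def pvA_line (character : String) (line : List String) : List String × List String :=
  line.foldl (fun (acc : List String × List String) w =>
    if w = "" then acc
    else if w = character then (acc.1 ++ ["___"], acc.2 ++ [character])
    else (acc.1 ++ [w], acc.2 ++ [w])) ([], [])

def get_novel_sentences_from_versions_dict (version : List (List String)) (character : String) (background_vocab : Option (List String)) : List (List String) × List (List String) :=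
  version.foldl (fun (acc : List (List String) × List (List String)) line =>
    let p := pvA_line character line
    (acc.1 ++ [p.1], acc.2 ++ [p.2])) ([], [])

-- ===== PORT B =====
-- Source B's _scatter: preallocated buckets, one append per stream entry.
-- The stream index comes from enumerate and is always ≥ 0, so `.toNat` is exact here (no clamping).
def pvScatter (flat : List (Int × String)) (n : Nat) (g : String → String) : List (List String) :=
  flat.foldl (fun buckets p => buckets.modify p.1.toNat (fun l => l ++ [g p.2]))
    (List.replicate n [])

def get_novel_sentences_from_versions_dict_alt (version : List (List String)) (character : String) (background_vocab : Option (List String)) : List (List String) × List (List String) :=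
  let flat := (PySem.List.enumerate version).flatMap
    (fun p => (p.2.filter (fun w => w ≠ "")).map (fun w => (p.1, w)))
  let n := version.length
  let vocab_final := pvScatter flat n (fun w => w)
  let book_final := pvScatter flat n (fun w => if w = character then "___" else w)
  (book_final, vocab_final)

-- ===== PRECONDITION & SPEC =====
def Spec_get_novel_sentences_from_versions_dict (version : List (List String)) (character : String) (background_vocab : Option (List String)) (out : List (List String) × List (List String)) : Prop := out = get_novel_sentences_from_versions_dict_alt version character background_vocab
instance (version : List (List String)) (character : String) (background_vocab : Option (List String)) (out : List (List String) × List (List String)) : Decidable (Spec_get_novel_sentences_from_versions_dict version character background_vocab out) := by unfold Spec_get_novel_sentences_from_versions_dict; infer_instance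

-- ===== CLAIM (what is proved, stated in full; the proofs are below) =====
def Claim_equal_get_novel_sentences_from_versions_dict : Prop := ∀ (version : List (List String)) (character : String) (background_vocab : Option (List String)), Dom_get_novel_sentences_from_versions_dict version character background_vocab → Spec_get_novel_sentences_from_versions_dict version character background_vocab (get_novel_sentences_from_versions_dict version character background_vocab)

-- ===== LEMMAS AND PROOFS =====

-- A's side: its interleaved per-line loop computes (masked filter, filter).
theorem pvA_line_go (character : String) (line : List String) (a b : List String) :
    line.foldl (fun (acc : List String × List String) w =>
      if w = "" then acc
      else if w = character then (acc.1 ++ ["___"], acc.2 ++ [character])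
      else (acc.1 ++ [w], acc.2 ++ [w])) (a, b)
    = (a ++ (line.filter (fun w => w ≠ "")).map (fun w => if w = character then "___" else w),
       b ++ line.filter (fun w => w ≠ "")) := by
  induction line generalizing a b with
  | nil => simp
  | cons w ws ih =>
    by_cases h0 : w = ""
    · simp [h0, ih]
    · by_cases hc : w = character
      · subst hc; simp [h0, ih]
      · simp [h0, hc, ih]

theorem pvA_line_eq (character : String) (line : List String) :
    pvA_line character line
    = ((line.filter (fun w => w ≠ "")).map (fun w => if w = character then "___" else w),
       line.filter (fun w => w ≠ "")) := by
  simpa [pvA_line] using pvA_line_go character line [] []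

theorem pvA_outer_go (character : String) (version : List (List String)) (a b : List (List String)) :
    version.foldl (fun (acc : List (List String) × List (List String)) line =>
      let p := pvA_line character line
      (acc.1 ++ [p.1], acc.2 ++ [p.2])) (a, b)
    = (a ++ version.map (fun line => (line.filter (fun w => w ≠ "")).map (fun w => if w = character then "___" else w)),
       b ++ version.map (fun line => line.filter (fun w => w ≠ ""))) := by
  induction version generalizing a b with
  | nil => simp
  | cons l ls ih =>
    rw [List.foldl_cons, ih]
    simp [pvA_line_eq]

-- B's side: characterise the scatter fold.
theorem modify_append_length (pre : List (List String)) (x : List String)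
    (suf : List (List String)) (f : List String → List String) :
    (pre ++ x :: suf).modify pre.length f = pre ++ f x :: suf := by
  induction pre with
  | nil => simp
  | cons a as ih => simpa [List.modify_succ_cons] using ih

-- Scattering a run of entries that all carry the same index i appends their images to bucket i.
theorem scatter_const_idx (ws : List String) (g : String → String) (s : Int)
    (acc : List (List String)) :
    (ws.map (fun w => (s, w))).foldl
      (fun buckets p => buckets.modify p.1.toNat (fun l => l ++ [g p.2])) acc
    = acc.modify s.toNat (fun l => l ++ ws.map g) := by
  induction ws generalizing acc with
  | nil =>
    simp only [List.map_nil, List.foldl_nil, List.append_nil]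
    exact (List.modify_id _ _).symm
  | cons w ws ih =>
    rw [List.map_cons, List.foldl_cons, ih, List.modify_modify_eq]
    congr 1
    funext l
    simp

-- The whole scatter over the flattened stream rebuilds the per-line filtered (and mapped) lists.
theorem scatter_flat_from (g : String → String) (version : List (List String))
    (pre : List (List String)) :
    ((PySem.List.enumerate version (pre.length : Int)).flatMap
        (fun p => (p.2.filter (fun w => w ≠ "")).map (fun w => (p.1, w)))).foldl
      (fun buckets p => buckets.modify p.1.toNat (fun l => l ++ [g p.2]))
      (pre ++ List.replicate version.length [])
    = pre ++ version.map (fun line => (line.filter (fun w => w ≠ "")).map g) := by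
  induction version generalizing pre with
  | nil => simp [PySem.List.enumerate_nil]
  | cons l ls ih =>
    rw [PySem.List.enumerate_cons, List.flatMap_cons, List.foldl_append]
    have h1 : (pre ++ List.replicate (l :: ls).length ([] : List String))
        = pre ++ ([] : List String) :: List.replicate ls.length [] := by
      simp [List.replicate_succ]
    rw [h1, scatter_const_idx, Int.toNat_natCast, modify_append_length]
    have h2 : ((pre.length : Int) + 1) = (((pre ++ [(l.filter (fun w => w ≠ "")).map g]).length : Nat) : Int) := by
      simp
    rw [h2]
    have h3 := ih (pre ++ [(l.filter (fun w => w ≠ "")).map g])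
    simpa using h3

theorem scatter_eq (g : String → String) (version : List (List String)) :
    pvScatter ((PySem.List.enumerate version).flatMap
        (fun p => (p.2.filter (fun w => w ≠ "")).map (fun w => (p.1, w))))
      version.length g
    = version.map (fun line => (line.filter (fun w => w ≠ "")).map g) := by
  simpa [pvScatter] using scatter_flat_from g version []

-- ===== VERDICT (by name: the statement is the Claim_ definition above) =====
theorem get_novel_sentences_from_versions_dict_spec : Claim_equal_get_novel_sentences_from_versions_dict := by
  intro version character background_vocab _
  unfold Spec_get_novel_sentences_from_versions_dict
  unfold get_novel_sentences_from_versions_dict get_novel_sentences_from_versions_dict_alt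
  rw [pvA_outer_go]
  refine Prod.ext ?_ ?_
  · exact (scatter_eq (fun w => if w = character then "___" else w) version).symm
  · have h := scatter_eq (fun w => w) version
    simp only [List.map_id'] at h
    exact h.symm
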